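-- pv_equiv track=rewrite | github.com/MakeB-rin/Ejercicios-en-Python | Ejercicios Normales/E_Dos_Unos.py | numeros_con_dos_bits_en_uno
-- ===== SOURCE A (Python) =====
-- def numeros_con_dos_bits_en_uno(n):
--     resultado = []
--
--     for i in range(32):
--         for j in range(i + 1, 32):
--             num = (1 << i) + (1 << j)
--             resultado.append(num)
--
--     resultado.sort()
--     return resultado[:n]
-- ===== SOURCE B (Python) =====
-- def numeros_con_dos_bits_en_uno(n):
--     # Gosper's hack: starting from 3 (the smallest integer with two set bits),
--     # repeatedly step to the next larger integer with the same popcount.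
--     # 496 = C(32,2) numbers cover the 32 bit positions; the slice keeps exact
--     # behaviour for any n.  All intermediates stay nonnegative.
--     lst = []
--     x = 3
--     for _ in range(496):
--         lst.append(x)
--         c = x ^ (x & (x - 1))          # lowest set bit of x
--         r = x + c
--         x = r | (((x ^ r) // 4) // c)  # move the bit pair onward
--     return lst[:n]
-- ===== Notes on version B (the rewrite author's own statement) =====
-- stated objective: alternative
-- what changed: B replaces the nested loops over bit-position pairs plus a sort by Gosper's hack: a single loop that steps each two-set-bit number directly to the next larger one with the same popcount, producing the 496 numbers already in ascending order; the slice [:n] keeps identical edge behaviour.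
import Mathlib
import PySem

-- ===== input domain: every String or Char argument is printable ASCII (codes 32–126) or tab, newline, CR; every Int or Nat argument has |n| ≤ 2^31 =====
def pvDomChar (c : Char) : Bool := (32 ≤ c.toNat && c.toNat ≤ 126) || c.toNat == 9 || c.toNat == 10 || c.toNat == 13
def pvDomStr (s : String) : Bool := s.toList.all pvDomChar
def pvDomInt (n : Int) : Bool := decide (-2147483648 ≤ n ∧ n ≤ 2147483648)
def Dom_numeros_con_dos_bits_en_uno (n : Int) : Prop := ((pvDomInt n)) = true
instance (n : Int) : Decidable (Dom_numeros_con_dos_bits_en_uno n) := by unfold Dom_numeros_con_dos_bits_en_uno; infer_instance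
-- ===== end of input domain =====

-- B replaces the nested bit-position loops + sort by Gosper's hack, a single loop stepping
-- each two-set-bit number to the next one in increasing order; same return value.

-- ===== PORT A =====
def numeros_con_dos_bits_en_uno (n : Int) : List Int :=
  let resultado := (PySem.List.pyRange 0 32 1).foldl (fun acc i =>
    (PySem.List.pyRange (i + 1) 32 1).foldl (fun acc2 j =>
      acc2 ++ [(1 : Int) <<< i.toNat + (1 : Int) <<< j.toNat]) acc) []
  let resultado := PySem.List.sorted resultado (fun x => x) false
  PySem.List.slice resultado none (some n)

-- ===== PORT B =====
-- Python's &, ^, | on nonnegative ints coincide with Nat's bitwise ops; every value in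
-- B's loop is nonnegative, so these helpers are exact there.
def pvAnd (a b : Int) : Int := ((a.toNat &&& b.toNat : Nat) : Int)
def pvXor (a b : Int) : Int := ((a.toNat ^^^ b.toNat : Nat) : Int)
def pvOr (a b : Int) : Int := ((a.toNat ||| b.toNat : Nat) : Int)

def numeros_con_dos_bits_en_uno_alt (n : Int) : List Int :=
  let st := (PySem.List.pyRange 0 496 1).foldl (fun (p : List Int × Int) _ =>
    let lst := p.1 ++ [p.2]
    let x := p.2
    let c := pvXor x (pvAnd x (x - 1))
    let r := x + c
    (lst, pvOr r (PySem.Int.floordiv (PySem.Int.floordiv (pvXor x r) 4) c)))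
    ([], 3)
  PySem.List.slice st.1 none (some n)

-- ===== PRECONDITION & SPEC =====
def Spec_numeros_con_dos_bits_en_uno (n : Int) (out : List Int) : Prop := out = numeros_con_dos_bits_en_uno_alt n
instance (n : Int) (out : List Int) : Decidable (Spec_numeros_con_dos_bits_en_uno n out) := by unfold Spec_numeros_con_dos_bits_en_uno; infer_instance

-- ===== CLAIM (what is proved, stated in full; the proofs are below) =====
def Claim_equal_numeros_con_dos_bits_en_uno : Prop := ∀ (n : Int), Dom_numeros_con_dos_bits_en_uno n → Spec_numeros_con_dos_bits_en_uno n (numeros_con_dos_bits_en_uno n)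

-- ===== LEMMAS AND PROOFS =====

-- the two underlying full 496-element lists agree: sorting A's list yields exactly the
-- sequence Gosper's hack produces
set_option maxRecDepth 100000 in
set_option maxHeartbeats 4000000 in
theorem pv_lists_eq :
    PySem.List.sorted ((PySem.List.pyRange 0 32 1).foldl (fun acc i =>
      (PySem.List.pyRange (i + 1) 32 1).foldl (fun acc2 j =>
        acc2 ++ [(1 : Int) <<< i.toNat + (1 : Int) <<< j.toNat]) acc) []) (fun x => x) false
    = ((PySem.List.pyRange 0 496 1).foldl (fun (p : List Int × Int) _ =>
        let lst := p.1 ++ [p.2]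
        let x := p.2
        let c := pvXor x (pvAnd x (x - 1))
        let r := x + c
        (lst, pvOr r (PySem.Int.floordiv (PySem.Int.floordiv (pvXor x r) 4) c)))
        ([], 3)).1 := by
  decide

-- ===== VERDICT (by name: the statement is the Claim_ definition above) =====
theorem numeros_con_dos_bits_en_uno_spec : Claim_equal_numeros_con_dos_bits_en_uno := by
  intro n _
  exact congrArg (fun l => PySem.List.slice l none (some n)) pv_lists_eq
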